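-- pv_equiv track=rewrite | github.com/nlgilbert/advent_of_code_2021 | day23/main.py | can_move_into_room
-- ===== SOURCE A (Python) =====
-- def can_move_into_room(burrow, col, letter, desired_letter):
--     if letter != desired_letter:
--         return False
--     hit_empty_space = False
--     for row in range(len(burrow) - 2, 1, -1):
--         if hit_empty_space:
--             if burrow[row][col] != '.':
--                 return False
--         else:
--             if burrow[row][col] == '.':
--                 hit_empty_space = True
--             elif burrow[row][col] != desired_letter:
--                 return False
--     return True
-- ===== SOURCE B (Python) =====
-- def can_move_into_room(burrow, col, letter, desired_letter):
--     if letter != desired_letter: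
--         return False
--     s = [burrow[r][col] for r in range(len(burrow) - 2, 1, -1)]
--     k = s.count(desired_letter)
--     return s == [desired_letter] * k + ['.'] * (len(s) - k)
-- ===== Notes on version B (the rewrite author's own statement) =====
-- stated objective: simpler
-- what changed: Replaces the stateful bottom-up scan with a hit_empty_space flag and three early returns by building the column bottom-to-top once and comparing it to its canonical form (a block of desired letters followed by dots).
-- outside the precondition, e.g. on can_move_into_room([[], [], [], ['B'], ['X']], 0, 'A', 'A'): A returns False, B raises IndexError
import Mathlib
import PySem

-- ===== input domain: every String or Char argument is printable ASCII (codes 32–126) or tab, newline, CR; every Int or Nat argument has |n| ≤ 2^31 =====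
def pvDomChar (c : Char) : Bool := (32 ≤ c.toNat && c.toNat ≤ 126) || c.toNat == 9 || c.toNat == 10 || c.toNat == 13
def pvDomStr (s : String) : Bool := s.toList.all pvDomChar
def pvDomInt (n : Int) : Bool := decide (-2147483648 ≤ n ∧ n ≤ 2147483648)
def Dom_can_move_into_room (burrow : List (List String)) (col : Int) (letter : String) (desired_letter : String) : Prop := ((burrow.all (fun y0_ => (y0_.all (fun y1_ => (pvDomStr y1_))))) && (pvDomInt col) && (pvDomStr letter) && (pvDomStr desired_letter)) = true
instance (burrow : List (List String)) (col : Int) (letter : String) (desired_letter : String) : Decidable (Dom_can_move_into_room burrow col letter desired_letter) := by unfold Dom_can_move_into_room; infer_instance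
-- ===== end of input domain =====

-- B replaces A's stateful flag-scan of the room column by building the column once
-- bottom-to-top and comparing it with its canonical form (desired letters then dots): simpler, same cost.

-- ===== PORT A =====
-- the 'for row in range(len(burrow)-2, 1, -1)' loop with the hit_empty_space flag and early returns
def pvLoopA (burrow : List (List String)) (col : Int) (d : String) : List Int → Bool → Bool
  | [], _ => true
  | r :: rs, hit =>
    let c := PySem.List.pyGetD ((PySem.List.pyGet? burrow r).getD []) col ""
    if hit then
      if c ≠ "." then false else pvLoopA burrow col d rs true
    else
      if c = "." then pvLoopA burrow col d rs true
      else if c ≠ d then false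
      else pvLoopA burrow col d rs false

def can_move_into_room (burrow : List (List String)) (col : Int) (letter : String) (desired_letter : String) : Bool :=
  if letter ≠ desired_letter then false
  else pvLoopA burrow col desired_letter (PySem.List.pyRange ((burrow.length : Int) - 2) 1 (-1)) false

-- ===== PORT B =====
def can_move_into_room_alt (burrow : List (List String)) (col : Int) (letter : String) (desired_letter : String) : Bool :=
  if letter ≠ desired_letter then false
  else
    let s := (PySem.List.pyRange ((burrow.length : Int) - 2) 1 (-1)).map
      (fun r => PySem.List.pyGetD ((PySem.List.pyGet? burrow r).getD []) col "")
    let k := s.count desired_letter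
    decide (s = List.replicate k desired_letter ++ List.replicate (s.length - k) ".")

-- ===== PRECONDITION & SPEC =====
-- Pre_ excludes inputs where some scanned cell burrow[row][col] has col out of range: Python B
-- raises IndexError there, while Python A either raises too or returns False by an earlier early return.
def Pre_can_move_into_room (burrow : List (List String)) (col : Int) (letter : String) (desired_letter : String) : Prop :=
  letter ≠ desired_letter ∨
    ∀ r ∈ PySem.List.pyRange ((burrow.length : Int) - 2) 1 (-1),
      -(((PySem.List.pyGet? burrow r).getD []).length : Int) ≤ col ∧
        col < (((PySem.List.pyGet? burrow r).getD []).length : Int)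
instance (burrow : List (List String)) (col : Int) (letter : String) (desired_letter : String) : Decidable (Pre_can_move_into_room burrow col letter desired_letter) := by unfold Pre_can_move_into_room; infer_instance

def pvWitness_can_move_into_room : List (List String) × Int × String × String :=
  ([["#"], ["#"], ["A"], ["#"]], 0, "A", "A")

def Spec_can_move_into_room (burrow : List (List String)) (col : Int) (letter : String) (desired_letter : String) (out : Bool) : Prop := out = can_move_into_room_alt burrow col letter desired_letter
instance (burrow : List (List String)) (col : Int) (letter : String) (desired_letter : String) (out : Bool) : Decidable (Spec_can_move_into_room burrow col letter desired_letter out) := by unfold Spec_can_move_into_room; infer_instance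

-- ===== CLAIM (what is proved, stated in full; the proofs are below) =====
def Claim_equal_can_move_into_room : Prop := ∀ (burrow : List (List String)) (col : Int) (letter : String) (desired_letter : String), Dom_can_move_into_room burrow col letter desired_letter → Pre_can_move_into_room burrow col letter desired_letter → Spec_can_move_into_room burrow col letter desired_letter (can_move_into_room burrow col letter desired_letter)

-- ===== LEMMAS AND PROOFS =====

-- A's scan abstracted over the list of cell values
def pvScan (d : String) : List String → Bool → Bool
  | [], _ => true
  | c :: cs, hit =>
    if hit then
      if c ≠ "." then false else pvScan d cs true
    else
      if c = "." then pvScan d cs true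
      else if c ≠ d then false
      else pvScan d cs false

theorem loopA_eq_scan (burrow : List (List String)) (col : Int) (d : String) :
    ∀ (rs : List Int) (hit : Bool),
      pvLoopA burrow col d rs hit =
        pvScan d (rs.map (fun r => PySem.List.pyGetD ((PySem.List.pyGet? burrow r).getD []) col "")) hit := by
  intro rs
  induction rs with
  | nil => intro hit; cases hit <;> rfl
  | cons r rs ih =>
    intro hit
    cases hit <;> simp only [pvLoopA, pvScan, List.map_cons, ih]

theorem cons_decomp {c d : String} {cs : List String} {i j : ℕ}
    (h : c :: cs = List.replicate i d ++ List.replicate j ".") :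
    (i = 0 ∧ ∃ j', j = j' + 1 ∧ c = "." ∧ cs = List.replicate j' ".") ∨
      (∃ i', i = i' + 1 ∧ c = d ∧ cs = List.replicate i' d ++ List.replicate j ".") := by
  cases i with
  | zero =>
    cases j with
    | zero => simp at h
    | succ j' =>
      simp [List.replicate_succ] at h
      exact Or.inl ⟨rfl, j', rfl, h.1, h.2⟩
  | succ i' =>
    simp [List.replicate_succ] at h
    exact Or.inr ⟨i', rfl, h.1, h.2⟩

theorem scan_true_iff (d : String) (cells : List String) :
    pvScan d cells true = true ↔ ∀ x ∈ cells, x = "." := by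
  induction cells with
  | nil => simp [pvScan]
  | cons c cs ih => by_cases hc : c = "." <;> simp [pvScan, hc, ih]

theorem scan_false_iff (d : String) (cells : List String) :
    pvScan d cells false = true ↔
      ∃ i j, cells = List.replicate i d ++ List.replicate j "." := by
  induction cells with
  | nil => simpa [pvScan] using ⟨0, 0, rfl⟩
  | cons c cs ih =>
    by_cases hc : c = "."
    · subst hc
      simp only [pvScan, Bool.false_eq_true, if_false, if_pos rfl, if_true, eq_self_iff_true,
        scan_true_iff]
      constructor
      · intro h
        refine ⟨0, cs.length + 1, ?_⟩
        rw [List.replicate_zero, List.nil_append, List.replicate_succ]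
        exact congrArg (List.cons ".") (List.eq_replicate_iff.mpr ⟨rfl, h⟩)
      · rintro ⟨i, j, h⟩
        rcases cons_decomp h with ⟨_, j', _, _, hcs⟩ | ⟨i', _, hcd, hcs⟩
        · subst hcs
          intro x hx; exact List.eq_of_mem_replicate hx
        · intro x hx
          rw [hcs] at hx
          rcases List.mem_append.mp hx with hx | hx
          · rw [List.eq_of_mem_replicate hx, ← hcd]
          · exact List.eq_of_mem_replicate hx
    · by_cases hd : c = d
      · subst hd
        simp only [pvScan, Bool.false_eq_true, if_false, if_neg hc,
          if_neg (by simp : ¬ (c ≠ c)), ih]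
        constructor
        · rintro ⟨i, j, h⟩; exact ⟨i + 1, j, by simp [List.replicate_succ, h]⟩
        · rintro ⟨i, j, h⟩
          rcases cons_decomp h with ⟨_, j', _, hcdot, _⟩ | ⟨i', _, _, hcs⟩
          · exact absurd hcdot hc
          · exact ⟨i', j, hcs⟩
      · simp only [pvScan, Bool.false_eq_true, if_false, if_neg hc,
          if_pos (by simpa using hd)]
        constructor
        · intro h; simp at h
        · rintro ⟨i, j, h⟩
          rcases cons_decomp h with ⟨_, j', _, hcdot, _⟩ | ⟨i', _, hcd, _⟩
          · exact absurd hcdot hc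
          · exact absurd hcd hd

theorem canon_iff (d : String) (cells : List String) :
    (cells = List.replicate (cells.count d) d ++
        List.replicate (cells.length - cells.count d) ".") ↔
      ∃ i j, cells = List.replicate i d ++ List.replicate j "." := by
  constructor
  · intro h; exact ⟨_, _, h⟩
  · rintro ⟨i, j, rfl⟩
    by_cases hd : d = "."
    · subst hd
      rw [← List.replicate_add]
      simp [List.count_replicate]
    · have hcount : (List.replicate i d ++ List.replicate j ".").count d = i := by
        simp only [List.count_append, List.count_replicate, BEq.rfl, if_pos]
        have hne : ¬ ("." : String) = d := fun h => hd h.symm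
        simp [hne]
      have hlen : (List.replicate i d ++ List.replicate j ".").length = i + j := by simp
      rw [hcount, hlen]
      simp

-- ===== VERDICT (by name: the statement is the Claim_ definition above) =====
theorem can_move_into_room_spec : Claim_equal_can_move_into_room := by
  intro burrow col letter desired_letter _ _
  unfold Spec_can_move_into_room can_move_into_room can_move_into_room_alt
  by_cases hl : letter = desired_letter
  · subst hl
    simp only [ne_eq, not_true_eq_false, if_false, loopA_eq_scan]
    set cells := (PySem.List.pyRange ((burrow.length : Int) - 2) 1 (-1)).map
      (fun r => PySem.List.pyGetD ((PySem.List.pyGet? burrow r).getD []) col "") with hcells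
    by_cases hs : pvScan letter cells false = true
    · have hcanon := (canon_iff letter cells).mpr ((scan_false_iff letter cells).mp hs)
      rw [hs]
      exact (decide_eq_true hcanon).symm
    · have h2 : pvScan letter cells false = false := Bool.eq_false_iff.mpr hs
      have hnc : ¬ (cells = List.replicate (cells.count letter) letter ++
          List.replicate (cells.length - cells.count letter) ".") :=
        fun hx => hs ((scan_false_iff letter cells).mpr ((canon_iff letter cells).mp hx))
      rw [h2]
      exact (decide_eq_false hnc).symm
  · simp [hl]
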